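-- pv_equiv track=rewrite | github.com/notofu/IRmodel | ir_analyzer/analysis.py | _split_features_on_closure
-- ===== SOURCE A (Python) =====
-- def _split_features_on_closure(integrated_features, closure_index):
-- 	closure_devided_features = []
-- 	closure_devided_index = []
-- 	splited_features = []
-- 	splited_index = []
-- 	#これがよくわからない
--
--
--
-- 	for i, value in enumerate(integrated_features):
-- 		if(i in closure_index or i == len(integrated_features)-1):
-- 			splited_features.append(value)
-- 			splited_index.append(i)
-- 			closure_devided_features.append(splited_features)
-- 			closure_devided_index.append(splited_index)
--
-- 			splited_features = [value]
-- 			splited_index = [i]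
-- 		else:
-- 			splited_features.append(value)
-- 			splited_index.append(i)
-- 		#closure_devided_features.append(splited_features)
-- 		#closure_devided_index.append(splited_index)
-- 	return closure_devided_features, closure_devided_index
-- ===== SOURCE B (Python) =====
-- def _split_features_on_closure(integrated_features, closure_index):
--     # Two-phase: compute boundary indices first, then slice out each group
--     # (each group runs from the previous boundary inclusive to this boundary).
--     n = len(integrated_features)
--     boundaries = [i for i in range(n) if i in closure_index or i == n - 1]
--     feature_groups = []
--     index_groups = []
--     start = 0
--     for b in boundaries:
--         feature_groups.append(integrated_features[start:b + 1])
--         index_groups.append(list(range(start, b + 1)))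
--         start = b
--     return feature_groups, index_groups
-- ===== Notes on version B (the rewrite author's own statement) =====
-- stated objective: alternative
-- what changed: Replaces A's single pass with per-element append/reset accumulators by a two-phase approach: first compute the list of boundary indices, then emit each group by slicing the input between consecutive boundaries.
import Mathlib
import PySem

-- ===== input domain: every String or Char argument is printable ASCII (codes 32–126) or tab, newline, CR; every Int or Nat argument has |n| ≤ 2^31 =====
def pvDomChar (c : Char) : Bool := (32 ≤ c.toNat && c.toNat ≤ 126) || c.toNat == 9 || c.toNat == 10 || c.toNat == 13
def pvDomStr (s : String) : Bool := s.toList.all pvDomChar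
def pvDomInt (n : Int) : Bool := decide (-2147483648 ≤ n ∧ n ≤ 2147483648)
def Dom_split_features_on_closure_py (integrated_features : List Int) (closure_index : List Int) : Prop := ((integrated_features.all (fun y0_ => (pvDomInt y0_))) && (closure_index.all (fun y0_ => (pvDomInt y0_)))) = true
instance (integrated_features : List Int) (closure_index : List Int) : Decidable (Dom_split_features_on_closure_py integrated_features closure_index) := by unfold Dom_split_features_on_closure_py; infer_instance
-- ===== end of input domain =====

-- B replaces A's append-and-reset single pass by computing the boundary-index list first and
-- slicing each group out between consecutive boundaries (objective: alternative decomposition).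

-- ===== PORT A =====
-- state: (closure_devided_features, closure_devided_index, splited_features, splited_index)
def split_features_on_closure_py (integrated_features : List Int) (closure_index : List Int) : List (List Int) × List (List Int) :=
  let r :=
    (PySem.List.enumerate integrated_features 0).foldl
      (fun (st : List (List Int) × List (List Int) × List Int × List Int) (p : Int × Int) =>
        if closure_index.contains p.1 || p.1 == (integrated_features.length : Int) - 1 then
          (st.1 ++ [st.2.2.1 ++ [p.2]], st.2.1 ++ [st.2.2.2 ++ [p.1]], [p.2], [p.1])
        else
          (st.1, st.2.1, st.2.2.1 ++ [p.2], st.2.2.2 ++ [p.1]))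
      ([], [], [], [])
  (r.1, r.2.1)

-- ===== PORT B =====
-- state: (feature_groups, index_groups, start)
def split_features_on_closure_py_alt (integrated_features : List Int) (closure_index : List Int) : List (List Int) × List (List Int) :=
  let n : Int := integrated_features.length
  let boundaries : List Int :=
    (PySem.List.pyRange 0 n 1).filter (fun i => closure_index.contains i || i == n - 1)
  let r :=
    boundaries.foldl
      (fun (st : List (List Int) × List (List Int) × Int) (b : Int) =>
        (st.1 ++ [PySem.List.slice integrated_features (some st.2.2) (some (b + 1))],
         st.2.1 ++ [PySem.List.pyRange st.2.2 (b + 1) 1],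
         b))
      ([], [], 0)
  (r.1, r.2.1)

-- ===== PRECONDITION & SPEC =====
def Spec_split_features_on_closure_py (integrated_features : List Int) (closure_index : List Int) (out : List (List Int) × List (List Int)) : Prop := out = split_features_on_closure_py_alt integrated_features closure_index
instance (integrated_features : List Int) (closure_index : List Int) (out : List (List Int) × List (List Int)) : Decidable (Spec_split_features_on_closure_py integrated_features closure_index out) := by unfold Spec_split_features_on_closure_py; infer_instance

-- ===== CLAIM (what is proved, stated in full; the proofs are below) =====
def Claim_equal_split_features_on_closure_py : Prop := ∀ (integrated_features : List Int) (closure_index : List Int), Dom_split_features_on_closure_py integrated_features closure_index → Spec_split_features_on_closure_py integrated_features closure_index (split_features_on_closure_py integrated_features closure_index)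

-- ===== LEMMAS AND PROOFS =====

-- Middle spec for A's loop: groups emitted from the remaining enumerated suffix,
-- given the currently accumulated open group (pf = values, pi = indices).
def pvG (cs : List Int) (nm1 : Int) : List (Int × Int) → List Int → List Int → List (List Int) × List (List Int)
  | [], _, _ => ([], [])
  | (i, v) :: rest, pf, pi =>
    if cs.contains i || i == nm1 then
      ((pf ++ [v]) :: (pvG cs nm1 rest [v] [i]).1, (pi ++ [i]) :: (pvG cs nm1 rest [v] [i]).2)
    else pvG cs nm1 rest (pf ++ [v]) (pi ++ [i])

-- Middle spec for B's loop: groups emitted from a running start and the remaining boundaries.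
def pvLoopB (fs : List Int) : Int → List Int → List (List Int) × List (List Int)
  | _, [] => ([], [])
  | s, b :: bs =>
    (PySem.List.slice fs (some s) (some (b + 1)) :: (pvLoopB fs b bs).1,
     PySem.List.pyRange s (b + 1) 1 :: (pvLoopB fs b bs).2)

-- boundaries at or after position k
def pvBds (fs cs : List Int) (k : Nat) : List Int :=
  (PySem.List.pyRange (k : Int) (fs.length : Int) 1).filter
    (fun i => cs.contains i || i == (fs.length : Int) - 1)

theorem pvFoldA (fs cs : List Int) (l : List (Int × Int)) :
    ∀ (cdf cdi : List (List Int)) (sf si : List Int),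
      (l.foldl
        (fun (st : List (List Int) × List (List Int) × List Int × List Int) (p : Int × Int) =>
          if cs.contains p.1 || p.1 == (fs.length : Int) - 1 then
            (st.1 ++ [st.2.2.1 ++ [p.2]], st.2.1 ++ [st.2.2.2 ++ [p.1]], [p.2], [p.1])
          else
            (st.1, st.2.1, st.2.2.1 ++ [p.2], st.2.2.2 ++ [p.1]))
        (cdf, cdi, sf, si)).1 = cdf ++ (pvG cs ((fs.length : Int) - 1) l sf si).1 ∧
      (l.foldl
        (fun (st : List (List Int) × List (List Int) × List Int × List Int) (p : Int × Int) =>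
          if cs.contains p.1 || p.1 == (fs.length : Int) - 1 then
            (st.1 ++ [st.2.2.1 ++ [p.2]], st.2.1 ++ [st.2.2.2 ++ [p.1]], [p.2], [p.1])
          else
            (st.1, st.2.1, st.2.2.1 ++ [p.2], st.2.2.2 ++ [p.1]))
        (cdf, cdi, sf, si)).2.1 = cdi ++ (pvG cs ((fs.length : Int) - 1) l sf si).2 := by
  induction l with
  | nil => intro cdf cdi sf si; simp [pvG]
  | cons p rest ih =>
    intro cdf cdi sf si
    obtain ⟨i, v⟩ := p
    by_cases h : i ∈ cs ∨ i = (fs.length : Int) - 1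
    · simpa [pvG, h] using ih (cdf ++ [sf ++ [v]]) (cdi ++ [si ++ [i]]) [v] [i]
    · simpa [pvG, h] using ih cdf cdi (sf ++ [v]) (si ++ [i])

theorem pvFoldB (fs : List Int) (bs : List Int) :
    ∀ (accF accI : List (List Int)) (s : Int),
      (bs.foldl
        (fun (st : List (List Int) × List (List Int) × Int) (b : Int) =>
          (st.1 ++ [PySem.List.slice fs (some st.2.2) (some (b + 1))],
           st.2.1 ++ [PySem.List.pyRange st.2.2 (b + 1) 1],
           b))
        (accF, accI, s)).1 = accF ++ (pvLoopB fs s bs).1 ∧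
      (bs.foldl
        (fun (st : List (List Int) × List (List Int) × Int) (b : Int) =>
          (st.1 ++ [PySem.List.slice fs (some st.2.2) (some (b + 1))],
           st.2.1 ++ [PySem.List.pyRange st.2.2 (b + 1) 1],
           b))
        (accF, accI, s)).2.1 = accI ++ (pvLoopB fs s bs).2 := by
  induction bs with
  | nil => intro accF accI s; simp [pvLoopB]
  | cons b rest ih =>
    intro accF accI s
    simpa [pvLoopB] using
      ih (accF ++ [PySem.List.slice fs (some s) (some (b + 1))])
        (accI ++ [PySem.List.pyRange s (b + 1) 1]) b

theorem pvSliceGlue (fs : List Int) (k : Nat) (b : Int) (hk : k < fs.length) (hb : (k : Int) ≤ b) :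
    PySem.List.slice fs (some (k : Int)) (some (b + 1)) =
      fs[k] :: PySem.List.slice fs (some ((k : Int) + 1)) (some (b + 1)) := by
  have h1 : ((k : Int) + 1) = ((k + 1 : Nat) : Int) := by push_cast; ring
  rw [h1, PySem.List.slice_toNat fs (by omega) (by omega),
    PySem.List.slice_toNat fs (by omega) (by omega)]
  simp only [Int.toNat_natCast]
  rw [← List.getElem_cons_drop hk]
  have h2 : (b + 1).toNat - k = ((b + 1).toNat - (k + 1)) + 1 := by omega
  rw [h2, List.take_succ_cons]

theorem pvMain (fs cs : List Int) :
    ∀ (m k : Nat), fs.length = k + m → ∀ (pf pi : List Int),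
      pvG cs ((fs.length : Int) - 1) (PySem.List.enumerate (fs.drop k) (k : Int)) pf pi =
        (match pvBds fs cs k with
         | [] => ([], [])
         | b :: bs =>
           ((pf ++ PySem.List.slice fs (some (k : Int)) (some (b + 1))) :: (pvLoopB fs b bs).1,
            (pi ++ PySem.List.pyRange (k : Int) (b + 1) 1) :: (pvLoopB fs b bs).2)) := by
  intro m
  induction m with
  | zero =>
    intro k hk pf pi
    have hd : fs.drop k = [] := by
      apply List.drop_eq_nil_of_le; omega
    have hbds : pvBds fs cs k = [] := by
      unfold pvBds
      rw [PySem.List.pyRange_one_eq_nil (by omega)]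
      simp
    rw [hd, hbds]
    simp [pvG, PySem.List.enumerate]
  | succ m ih =>
    intro k hk pf pi
    have hklt : k < fs.length := by omega
    have hd : fs.drop k = fs[k] :: fs.drop (k + 1) := (List.getElem_cons_drop hklt).symm
    have hrange : PySem.List.pyRange (k : Int) (fs.length : Int) 1 =
        (k : Int) :: PySem.List.pyRange ((k : Int) + 1) (fs.length : Int) 1 :=
      PySem.List.pyRange_one_cons (by omega)
    have hcast : ((k : Int) + 1) = ((k + 1 : Nat) : Int) := by push_cast; ring
    have hbds : pvBds fs cs k =
        if cs.contains (k : Int) || (k : Int) == (fs.length : Int) - 1 then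
          (k : Int) :: pvBds fs cs (k + 1)
        else pvBds fs cs (k + 1) := by
      unfold pvBds
      rw [hrange, hcast]
      simp [List.filter_cons]
    rw [hd]
    rw [PySem.List.enumerate_cons]
    by_cases hc : (cs.contains (k : Int) || (k : Int) == (fs.length : Int) - 1) = true
    · simp only [pvG, hc, if_true]
      rw [hbds, if_pos hc]
      have ih' := ih (k + 1) (by omega) [fs[k]] [(k : Int)]
      rw [← hcast] at ih'
      rw [ih']
      have hs : PySem.List.slice fs (some (k : Int)) (some ((k : Int) + 1)) = [fs[k]] := by
        rw [PySem.List.slice_toNat fs (by omega) (by omega)]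
        have h3 : ((k : Int) + 1).toNat = k + 1 := by omega
        have h4 : k + 1 - k = 1 := by omega
        simp only [Int.toNat_natCast, h3, h4]
        rw [hd]
        rfl
      have hr : PySem.List.pyRange (k : Int) ((k : Int) + 1) 1 = [(k : Int)] :=
        PySem.List.pyRange_one_singleton _
      cases hb2 : pvBds fs cs (k + 1) with
      | nil =>
        simp [hs, hr, pvLoopB]
      | cons b bs =>
        have hbmem : b ∈ pvBds fs cs (k + 1) := by rw [hb2]; exact List.mem_cons_self
        have hbr : ((k + 1 : Nat) : Int) ≤ b := by
          unfold pvBds at hbmem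
          have := (List.mem_filter.mp hbmem).1
          exact (PySem.List.mem_pyRange_one.mp this).1
        have hkb : (k : Int) ≤ b := by omega
        simp only [pvLoopB]
        rw [pvSliceGlue fs k b hklt hkb,
          PySem.List.pyRange_one_cons (a := (k : Int)) (b := b + 1) (by omega)]
        simp [hs]
    · simp only [pvG, hc, Bool.false_eq_true, if_false]
      rw [hbds, if_neg hc]
      have ih' := ih (k + 1) (by omega) (pf ++ [fs[k]]) (pi ++ [(k : Int)])
      rw [← hcast] at ih'
      rw [ih']
      cases hb2 : pvBds fs cs (k + 1) with
      | nil => rfl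
      | cons b bs =>
        have hbmem : b ∈ pvBds fs cs (k + 1) := by rw [hb2]; exact List.mem_cons_self
        have hbr : ((k + 1 : Nat) : Int) ≤ b := by
          unfold pvBds at hbmem
          have := (List.mem_filter.mp hbmem).1
          exact (PySem.List.mem_pyRange_one.mp this).1
        have hkb : (k : Int) ≤ b := by omega
        simp only [pvSliceGlue fs k b hklt hkb,
          PySem.List.pyRange_one_cons (a := (k : Int)) (b := b + 1) (by omega : (k : Int) < b + 1)]
        simp

-- ===== VERDICT (by name: the statement is the Claim_ definition above) =====
theorem split_features_on_closure_py_spec : Claim_equal_split_features_on_closure_py := by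
  intro fs cs _
  unfold Spec_split_features_on_closure_py split_features_on_closure_py split_features_on_closure_py_alt
  obtain ⟨hA1, hA2⟩ := pvFoldA fs cs (PySem.List.enumerate fs 0) [] [] [] []
  obtain ⟨hB1, hB2⟩ := pvFoldB fs (pvBds fs cs 0) [] [] 0
  have hM : pvG cs ((fs.length : Int) - 1) (PySem.List.enumerate fs 0) [] [] =
      (match pvBds fs cs 0 with
       | [] => ([], [])
       | b :: bs =>
         (([] ++ PySem.List.slice fs (some ((0:Nat) : Int)) (some (b + 1))) :: (pvLoopB fs b bs).1,
          ([] ++ PySem.List.pyRange ((0:Nat) : Int) (b + 1) 1) :: (pvLoopB fs b bs).2)) := by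
    have := pvMain fs cs fs.length 0 (by omega) [] []
    simpa using this
  have hbds0 : ((PySem.List.pyRange 0 (fs.length : Int) 1).filter
      (fun i => cs.contains i || i == (fs.length : Int) - 1)) = pvBds fs cs 0 := by
    unfold pvBds; norm_num
  simp only [hbds0]
  rw [Prod.ext_iff]
  constructor
  · rw [hA1, hB1, hM]
    cases hb : pvBds fs cs 0 with
    | nil => simp [pvLoopB]
    | cons b bs => simp [pvLoopB]
  · rw [hA2, hB2, hM]
    cases hb : pvBds fs cs 0 with
    | nil => simp [pvLoopB]
    | cons b bs => simp [pvLoopB]
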